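-- pv_equiv track=rewrite | github.com/pypi-data/pypi-mirror-404 | packages/py3plex/py3plex-1.1.3.tar.gz/py3plex-1.1.3/py3plex/dsl_legacy.py | _tokenize_match_pattern
-- ===== SOURCE A (Python) =====
-- from typing import Any, Dict, List, Optional, Set, Tuple, Union
--
-- def _tokenize_match_pattern(pattern_str: str) -> List[str]:
--     """Tokenize a MATCH pattern specifically.
--
--     This handles the Cypher-like pattern syntax:
--     (alias:Label)-[edge:Type]->(alias2:Label2)
--
--     Args:
--         pattern_str: The pattern string to tokenize
--
--     Returns:
--         List of pattern tokens
--     """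
--     # Use a more specific pattern for MATCH syntax
--     tokens = []
--     i = 0
--     while i < len(pattern_str):
--         c = pattern_str[i]
--
--         if c.isspace():
--             i += 1
--             continue
--
--         # Edge end with arrow: ]->
--         if pattern_str[i:i+3] == ']->':
--             tokens.append(']-')
--             tokens.append('->')
--             i += 3
--             continue
--
--         # Arrow alone: ->
--         if pattern_str[i:i+2] == '->':
--             tokens.append('->')
--             i += 2
--             continue
--
--         # Edge start: -[
--         if pattern_str[i:i+2] == '-[':
--             tokens.append('-[')
--             i += 2
--             continue
--
--         # Edge end without arrow (just ]-): shouldn't happen normally but handle it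
--         if pattern_str[i:i+2] == ']-':
--             tokens.append(']-')
--             i += 2
--             continue
--
--         # Single character tokens
--         if c in '():,':
--             tokens.append(c)
--             i += 1
--             continue
--
--         # Colon
--         if c == ':':
--             tokens.append(':')
--             i += 1
--             continue
--
--         # Identifiers
--         if c.isalpha() or c == '_':
--             j = i
--             while j < len(pattern_str) and (pattern_str[j].isalnum() or pattern_str[j] == '_'):
--                 j += 1
--             tokens.append(pattern_str[i:j])
--             i = j
--             continue
--
--         i += 1
--
--     return tokens
-- ===== SOURCE B (Python) =====
-- import re
--
-- # One master regex whose alternatives, in priority order, are ']->', ']-', '->',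
-- # '-[', the single-char tokens, and an ASCII identifier; finditer skips anything
-- # else (whitespace, lone '-', stray symbols).  A ']->' match expands to its two
-- # tokens ']-' and '->'.
-- _TOKEN_RE = re.compile(r"\]->|\]-|->|-\[|[():,]|[A-Za-z_][A-Za-z0-9_]*")
--
-- def _tokenize_match_pattern(pattern_str: str):
--     return [t
--             for m in _TOKEN_RE.finditer(pattern_str)
--             for t in ((']-', '->') if m.group(0) == ']->' else (m.group(0),))]
-- ===== Notes on version B (the rewrite author's own statement) =====
-- stated objective: idiomatic
-- what changed: Replaces A's hand-rolled index/slice ladder (explicit i, per-branch slice comparisons, inner identifier while-loop, a dead duplicate colon branch) by a single master regex of prioritized alternatives scanned once with re.finditer, with the three-character edge-arrow match expanding to its two tokens.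
import Mathlib
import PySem

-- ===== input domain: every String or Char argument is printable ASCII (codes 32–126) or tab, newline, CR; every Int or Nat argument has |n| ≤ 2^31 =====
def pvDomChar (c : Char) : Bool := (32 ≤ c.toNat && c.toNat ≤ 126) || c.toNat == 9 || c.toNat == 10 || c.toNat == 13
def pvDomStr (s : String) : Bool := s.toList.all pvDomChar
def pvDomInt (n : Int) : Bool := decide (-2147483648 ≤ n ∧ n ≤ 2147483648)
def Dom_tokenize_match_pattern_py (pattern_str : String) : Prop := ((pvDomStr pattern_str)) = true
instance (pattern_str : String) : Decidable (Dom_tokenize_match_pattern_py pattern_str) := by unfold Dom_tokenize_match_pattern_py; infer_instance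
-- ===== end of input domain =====

-- B replaces A's manual index/slice ladder by a single prioritized-alternatives scan
-- (a master regex in Python); objective: idiomatic. Equivalence of return values is proved below.


-- ===== PORT A =====
-- inner while condition: pattern_str[j].isalnum() or pattern_str[j] == '_'
def pvAWordChar (c : Char) : Bool := PySem.Chars.isalnum c || c == '_'

-- A's while loop over index i, transcribed as recursion on the remaining characters
-- (slices pattern_str[i:i+k] become List.take k of the remainder; the inner identifier
-- while loop is the takeWhile/dropWhile of pvAWordChar).
def pvALoop : List Char → List String
  | [] => []
  | c :: rest =>
    if PySem.Chars.isspace c then pvALoop rest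
    else if List.take 3 (c :: rest) = [']', '-', '>'] then
      "]-" :: "->" :: pvALoop (List.drop 2 rest)
    else if List.take 2 (c :: rest) = ['-', '>'] then
      "->" :: pvALoop (List.drop 1 rest)
    else if List.take 2 (c :: rest) = ['-', '['] then
      "-[" :: pvALoop (List.drop 1 rest)
    else if List.take 2 (c :: rest) = [']', '-'] then
      "]-" :: pvALoop (List.drop 1 rest)
    else if c ∈ ['(', ')', ':', ','] then
      String.ofList [c] :: pvALoop rest
    else if c = ':' then
      ":" :: pvALoop rest
    else if PySem.Chars.isalpha c || c == '_' then
      String.ofList (c :: List.takeWhile pvAWordChar rest) :: pvALoop (List.dropWhile pvAWordChar rest)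
    else pvALoop rest
termination_by cs => cs.length
decreasing_by
  all_goals simp [List.length_drop]
  all_goals first
    | omega
    | exact List.length_dropWhile_le _ _

def tokenize_match_pattern_py (pattern_str : String) : List String :=
  pvALoop pattern_str.toList

-- ===== PORT B =====
-- regex character classes [A-Za-z_] and [A-Za-z0-9_]
def pvBStart (c : Char) : Bool :=
  ('A' ≤ c && c ≤ 'Z') || ('a' ≤ c && c ≤ 'z') || c == '_'
def pvBWord (c : Char) : Bool := pvBStart c || ('0' ≤ c && c ≤ '9')

-- the regex alternatives, tried in priority order at the current position:
-- the matched token(s) and the remainder after the match, or none (finditer skips one char)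
def pvBTry (c : Char) (rest : List Char) : Option (List String × List Char) :=
  if c = ']' ∧ List.take 2 rest = ['-', '>'] then some (["]-", "->"], List.drop 2 rest)
  else if c = ']' ∧ List.take 1 rest = ['-'] then some (["]-"], List.drop 1 rest)
  else if c = '-' ∧ List.take 1 rest = ['>'] then some (["->"], List.drop 1 rest)
  else if c = '-' ∧ List.take 1 rest = ['['] then some (["-["], List.drop 1 rest)
  else if c = '(' ∨ c = ')' ∨ c = ':' ∨ c = ',' then some ([String.ofList [c]], rest)
  else if pvBStart c then
    some ([String.ofList (c :: List.takeWhile pvBWord rest)], List.dropWhile pvBWord rest)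
  else none

theorem pvBTry_rest_le {c : Char} {rest : List Char} {ts : List String} {r : List Char}
    (h : pvBTry c rest = some (ts, r)) : r.length ≤ rest.length := by
  unfold pvBTry at h
  split_ifs at h <;>
    simp only [Option.some.injEq, Prod.mk.injEq] at h <;>
    rcases h with ⟨-, rfl⟩
  all_goals first
    | simp [List.length_drop]
    | omega
    | exact List.length_dropWhile_le _ _

-- finditer: scan left to right, emitting the first alternative that matches,
-- skipping a character when none does
def pvBLoop : List Char → List String
  | [] => []
  | c :: rest =>
    match h : pvBTry c rest with
    | some (ts, r) => ts ++ pvBLoop r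
    | none => pvBLoop rest
termination_by cs => cs.length
decreasing_by
  · exact Nat.lt_succ_of_le (pvBTry_rest_le h)
  · simp

def tokenize_match_pattern_py_alt (pattern_str : String) : List String :=
  pvBLoop pattern_str.toList

-- ===== PRECONDITION & SPEC =====
def Spec_tokenize_match_pattern_py (pattern_str : String) (out : List String) : Prop := out = tokenize_match_pattern_py_alt pattern_str
instance (pattern_str : String) (out : List String) : Decidable (Spec_tokenize_match_pattern_py pattern_str out) := by unfold Spec_tokenize_match_pattern_py; infer_instance

-- ===== CLAIM (what is proved, stated in full; the proofs are below) =====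
def Claim_equal_tokenize_match_pattern_py : Prop := ∀ (pattern_str : String), Dom_tokenize_match_pattern_py pattern_str → Spec_tokenize_match_pattern_py pattern_str (tokenize_match_pattern_py pattern_str)

-- ===== LEMMAS AND PROOFS =====

theorem pvStart_eq (c : Char) : (PySem.Chars.isalpha c || c == '_') = pvBStart c := by
  simp only [PySem.Chars.isalpha, PySem.Chars.isupper, PySem.Chars.islower, pvBStart]

theorem pvWord_eq : pvAWordChar = pvBWord := by
  funext c
  simp only [pvAWordChar, pvBWord, pvBStart, PySem.Chars.isalnum, PySem.Chars.isalpha,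
    PySem.Chars.isupper, PySem.Chars.islower, PySem.Chars.isdigit]
  rw [Bool.eq_iff_iff]; simp; tauto

theorem pvB_cons_some {c : Char} {rest : List Char} {ts : List String} {r : List Char}
    (hB : pvBTry c rest = some (ts, r)) : pvBLoop (c :: rest) = ts ++ pvBLoop r := by
  rw [pvBLoop]; split <;> simp_all

theorem pvB_cons_none {c : Char} {rest : List Char}
    (hB : pvBTry c rest = none) : pvBLoop (c :: rest) = pvBLoop rest := by
  rw [pvBLoop]; split <;> simp_all

theorem pvBStart_ranges {c : Char} (h : pvBStart c = true) :
    (65 ≤ c.toNat ∧ c.toNat ≤ 90) ∨ (97 ≤ c.toNat ∧ c.toNat ≤ 122) ∨ c.toNat = 95 := by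
  simp only [pvBStart, Bool.or_eq_true, Bool.and_eq_true, decide_eq_true_eq, beq_iff_eq] at h
  rcases h with (⟨h1, h2⟩ | ⟨h1, h2⟩) | rfl
  · exact Or.inl ⟨h1, h2⟩
  · exact Or.inr (Or.inl ⟨h1, h2⟩)
  · right; right; rfl

theorem pvBTry_isspace {c : Char} (h : PySem.Chars.isspace c = true) (rest : List Char) :
    pvBTry c rest = none := by
  have hs : c.toNat = 32 ∨ (9 ≤ c.toNat ∧ c.toNat ≤ 13) ∨ (28 ≤ c.toNat ∧ c.toNat ≤ 31) ∨
      c.toNat = 133 ∨ 160 ≤ c.toNat := by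
    simp only [PySem.Chars.isspace, Bool.or_eq_true, Bool.and_eq_true, decide_eq_true_eq] at h
    omega
  have h1 : c ≠ ']' := by rintro rfl; exact absurd h (by decide)
  have h2 : c ≠ '-' := by rintro rfl; exact absurd h (by decide)
  have h3 : ¬(c = '(' ∨ c = ')' ∨ c = ':' ∨ c = ',') := by
    rintro (rfl | rfl | rfl | rfl) <;> exact absurd h (by decide)
  have h4 : pvBStart c = false := by
    cases hb : pvBStart c with
    | false => rfl
    | true => exact absurd (pvBStart_ranges hb) (by omega)
  simp [pvBTry, h1, h2, h3, h4]

theorem pvLoops_eq : ∀ (n : Nat) (cs : List Char), cs.length ≤ n → pvALoop cs = pvBLoop cs := by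
  intro n
  induction n with
  | zero =>
    intro cs h
    have hnil : cs = [] := List.eq_nil_of_length_eq_zero (Nat.le_zero.mp h)
    subst hnil; simp [pvALoop, pvBLoop]
  | succ n ih =>
    intro cs h
    cases cs with
    | nil => simp [pvALoop, pvBLoop]
    | cons c rest =>
      have hr : rest.length ≤ n := by simpa using h
      rw [pvALoop]
      split_ifs with h1 h2 h3 h4 h5 h6 h7 h8
      · -- whitespace: finditer skips it too
        rw [pvB_cons_none (pvBTry_isspace h1 rest)]; exact ih rest hr
      · -- ']->'
        rw [List.take_succ_cons, List.cons.injEq] at h2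
        obtain ⟨rfl, h2'⟩ := h2
        have hB : pvBTry ']' rest = some (["]-", "->"], List.drop 2 rest) := by
          simp [pvBTry, h2']
        rw [pvB_cons_some hB]
        simp only [List.cons_append, List.nil_append, List.cons.injEq, true_and]
        exact ih _ (by simp; omega)
      · -- '->'
        rw [List.take_succ_cons, List.cons.injEq] at h3
        obtain ⟨rfl, h3'⟩ := h3
        have hB : pvBTry '-' rest = some (["->"], List.drop 1 rest) := by
          simp [pvBTry, h3']
        rw [pvB_cons_some hB]
        simp only [List.cons_append, List.nil_append, List.cons.injEq, true_and]
        exact ih _ (by simp; omega)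
      · -- '-['
        rw [List.take_succ_cons, List.cons.injEq] at h4
        obtain ⟨rfl, h4'⟩ := h4
        have hB : pvBTry '-' rest = some (["-["], List.drop 1 rest) := by
          simp [pvBTry, h4']
        rw [pvB_cons_some hB]
        simp only [List.cons_append, List.nil_append, List.cons.injEq, true_and]
        exact ih _ (by simp; omega)
      · -- ']-' not followed by '>'
        rw [List.take_succ_cons, List.cons.injEq] at h5
        obtain ⟨rfl, h5'⟩ := h5
        rw [List.take_succ_cons] at h2
        have h2' : List.take 2 rest ≠ ['-', '>'] := fun hx => h2 (by rw [hx])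
        have hB : pvBTry ']' rest = some (["]-"], List.drop 1 rest) := by
          simp [pvBTry, h2', h5']
        rw [pvB_cons_some hB]
        simp only [List.cons_append, List.nil_append, List.cons.injEq, true_and]
        exact ih _ (by simp; omega)
      · -- single-char tokens '():,'
        simp only [List.mem_cons, List.not_mem_nil, or_false] at h6
        have hc1 : c ≠ ']' := by rintro rfl; revert h6; decide
        have hc2 : c ≠ '-' := by rintro rfl; revert h6; decide
        have hB : pvBTry c rest = some ([String.ofList [c]], rest) := by
          simp [pvBTry, hc1, hc2, h6]
        rw [pvB_cons_some hB]
        simp only [List.cons_append, List.nil_append, List.cons.injEq, true_and]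
        exact ih rest hr
      · -- dead ':' branch: ':' is already in '():,'
        exact absurd (by rw [h7]; simp) h6
      · -- identifier
        have hb : pvBStart c = true := pvStart_eq c ▸ h8
        have hrg := pvBStart_ranges hb
        have hc1 : c ≠ ']' := by
          rintro rfl; have e : (']' : Char).toNat = 93 := rfl; omega
        have hc2 : c ≠ '-' := by
          rintro rfl; have e : ('-' : Char).toNat = 45 := rfl; omega
        have hc3 : ¬(c = '(' ∨ c = ')' ∨ c = ':' ∨ c = ',') := by
          rintro (rfl | rfl | rfl | rfl) <;>
            first
              | (have e : ('(' : Char).toNat = 40 := rfl; omega)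
              | (have e : (')' : Char).toNat = 41 := rfl; omega)
              | (have e : (':' : Char).toNat = 58 := rfl; omega)
              | (have e : (',' : Char).toNat = 44 := rfl; omega)
        have hB : pvBTry c rest =
            some ([String.ofList (c :: List.takeWhile pvBWord rest)], List.dropWhile pvBWord rest) := by
          simp [pvBTry, hc1, hc2, hc3, hb]
        rw [pvB_cons_some hB, pvWord_eq]
        simp only [List.cons_append, List.nil_append, List.cons.injEq, true_and]
        exact ih _ (Nat.le_trans (List.length_dropWhile_le _ _) hr)
      · -- anything else is skipped by both
        have hB : pvBTry c rest = none := by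
          unfold pvBTry
          split_ifs with g1 g2 g3 g4 g5 g6
          · exact absurd (by rw [List.take_succ_cons, g1.1, g1.2]) h2
          · exact absurd (by rw [List.take_succ_cons, g2.1, g2.2]) h5
          · exact absurd (by rw [List.take_succ_cons, g3.1, g3.2]) h3
          · exact absurd (by rw [List.take_succ_cons, g4.1, g4.2]) h4
          · exact absurd (by simpa using g5) h6
          · exact absurd (pvStart_eq c ▸ g6) h8
          · rfl
        rw [pvB_cons_none hB]; exact ih rest hr

-- ===== VERDICT (by name: the statement is the Claim_ definition above) =====
theorem tokenize_match_pattern_py_spec : Claim_equal_tokenize_match_pattern_py := by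
  intro s _
  unfold Spec_tokenize_match_pattern_py tokenize_match_pattern_py tokenize_match_pattern_py_alt
  exact pvLoops_eq s.toList.length s.toList le_rfl
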